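-- pv_equiv track=rewrite | github.com/JensBouman/Piet_interpreter | interpreter/tokenFunctions.py | rollStack
-- ===== SOURCE A (Python) =====
-- from typing import List, Tuple, Union
--
-- def rollStack(dataStack: List[int], numberOfRolls: int, insertIndex: int) -> List[int]:
--     """
--     Rolls the stack recursively, and inverted when negative number of rolls
--     :param dataStack: Input stack
--     :param numberOfRolls: Number of rolls
--     :param insertIndex: At which index to either insert new values, or to get values from
--     :return: Rolled data stack
--     """
--     newStack = dataStack.copy()
--     if numberOfRolls > 0:
--         newStack.insert(insertIndex, newStack.pop())
--         return rollStack(newStack, numberOfRolls - 1, insertIndex)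
--     elif numberOfRolls < 0:
--         newStack.append(newStack.pop(insertIndex))
--         return rollStack(newStack, numberOfRolls + 1, insertIndex)
--     else:
--         return newStack
-- ===== SOURCE B (Python) =====
-- from typing import List
--
-- def rollStack(dataStack: List[int], numberOfRolls: int, insertIndex: int) -> List[int]:
--     """Closed-form roll: rotate the segment starting at the (clamped) insert
--     position by numberOfRolls mod segment length, in one slice rebuild."""
--     L = len(dataStack)
--     if numberOfRolls == 0 or L == 0:
--         return dataStack.copy()
--     if numberOfRolls > 0:
--         p = insertIndex if insertIndex >= 0 else insertIndex + L - 1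
--         p = max(0, min(p, L - 1))
--         k = numberOfRolls % (L - p)
--         return dataStack[:p] + dataStack[L - k:] + dataStack[p:L - k]
--     e = insertIndex if insertIndex >= 0 else insertIndex + L
--     k = (-numberOfRolls) % (L - e)
--     return dataStack[:e] + dataStack[e + k:] + dataStack[e:e + k]
-- ===== Notes on version B (the rewrite author's own statement) =====
-- stated objective: faster
-- what changed: Replaces the |numberOfRolls|-deep recursion that moves one element per call with a closed-form rebuild: clamp the insert position once, reduce the roll count modulo the segment length, and assemble the result from three slices.
import Mathlib
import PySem

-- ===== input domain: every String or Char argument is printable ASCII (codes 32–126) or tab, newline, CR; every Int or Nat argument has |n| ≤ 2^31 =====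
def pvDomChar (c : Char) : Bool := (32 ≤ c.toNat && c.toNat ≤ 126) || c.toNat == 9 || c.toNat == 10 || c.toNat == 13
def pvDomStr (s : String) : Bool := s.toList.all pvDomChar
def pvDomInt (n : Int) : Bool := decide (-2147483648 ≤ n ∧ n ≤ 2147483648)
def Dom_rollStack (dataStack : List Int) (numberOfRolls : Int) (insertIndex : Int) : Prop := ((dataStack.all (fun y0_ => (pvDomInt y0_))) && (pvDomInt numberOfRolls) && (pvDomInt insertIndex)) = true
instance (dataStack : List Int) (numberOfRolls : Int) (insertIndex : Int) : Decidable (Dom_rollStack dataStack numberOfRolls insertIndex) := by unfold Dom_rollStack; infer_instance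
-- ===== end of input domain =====

-- B replaces A's |numberOfRolls|-deep one-element-per-call recursion by a closed-form
-- three-slice rebuild with the roll count reduced modulo the rotated segment's length.

-- ===== PORT A =====
-- Literal transliteration of A; where Python's pop() raises (excluded by Pre_) the
-- port returns the current stack unchanged.
def rollStack (dataStack : List Int) (numberOfRolls : Int) (insertIndex : Int) : List Int :=
  let newStack := dataStack
  if numberOfRolls > 0 then
    match PySem.List.pop? newStack with
    | none => newStack  -- empty stack: Python raises IndexError (outside Pre_)
    | some (v, rest) =>
        rollStack (PySem.List.insert rest insertIndex v) (numberOfRolls - 1) insertIndex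
  else if numberOfRolls < 0 then
    match PySem.List.pop? newStack insertIndex with
    | none => newStack  -- pop index out of range: Python raises IndexError (outside Pre_)
    | some (v, rest) =>
        rollStack (rest ++ [v]) (numberOfRolls + 1) insertIndex
  else newStack
termination_by numberOfRolls.natAbs
decreasing_by all_goals omega

-- ===== PORT B =====
def rollStack_alt (dataStack : List Int) (numberOfRolls : Int) (insertIndex : Int) : List Int :=
  let L : Int := dataStack.length
  if numberOfRolls = 0 ∨ L = 0 then dataStack
  else if numberOfRolls > 0 then
    let p := max 0 (min (if insertIndex ≥ 0 then insertIndex else insertIndex + L - 1) (L - 1))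
    let k := PySem.Int.mod numberOfRolls (L - p)
    PySem.List.slice dataStack none (some p) ++ PySem.List.slice dataStack (some (L - k)) none
      ++ PySem.List.slice dataStack (some p) (some (L - k))
  else
    let e := if insertIndex ≥ 0 then insertIndex else insertIndex + L
    let k := PySem.Int.mod (-numberOfRolls) (L - e)
    PySem.List.slice dataStack none (some e) ++ PySem.List.slice dataStack (some (e + k)) none
      ++ PySem.List.slice dataStack (some e) (some (e + k))

-- ===== PRECONDITION & SPEC =====
-- Pre_ excludes exactly the inputs on which A raises IndexError: a positive roll of an
-- empty stack, or a negative roll whose pop index is out of range.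
def Pre_rollStack (dataStack : List Int) (numberOfRolls : Int) (insertIndex : Int) : Prop :=
  numberOfRolls = 0 ∨ (0 < numberOfRolls ∧ dataStack ≠ []) ∨
    (numberOfRolls < 0 ∧ -(dataStack.length : Int) ≤ insertIndex ∧ insertIndex < dataStack.length)
instance (dataStack : List Int) (numberOfRolls : Int) (insertIndex : Int) : Decidable (Pre_rollStack dataStack numberOfRolls insertIndex) := by unfold Pre_rollStack; infer_instance
def pvWitness_rollStack : List Int × Int × Int := ([1, 2, 3, 4], 2, 1)
def Spec_rollStack (dataStack : List Int) (numberOfRolls : Int) (insertIndex : Int) (out : List Int) : Prop := out = rollStack_alt dataStack numberOfRolls insertIndex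
instance (dataStack : List Int) (numberOfRolls : Int) (insertIndex : Int) (out : List Int) : Decidable (Spec_rollStack dataStack numberOfRolls insertIndex out) := by unfold Spec_rollStack; infer_instance

-- ===== CLAIM (what is proved, stated in full; the proofs are below) =====
def Claim_equal_rollStack : Prop := ∀ (dataStack : List Int) (numberOfRolls : Int) (insertIndex : Int), Dom_rollStack dataStack numberOfRolls insertIndex → Pre_rollStack dataStack numberOfRolls insertIndex → Spec_rollStack dataStack numberOfRolls insertIndex (rollStack dataStack numberOfRolls insertIndex)

-- ===== LEMMAS AND PROOFS =====


-- PySem.List.insert inserts at the Python-clamped position.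
theorem insert_clamp {α : Type} (xs : List α) (i : Int) (v : α) :
    PySem.List.insert xs i v =
      xs.take (PySem.List.clampIdx xs.length i) ++ v :: xs.drop (PySem.List.clampIdx xs.length i) := by
  unfold PySem.List.insert PySem.List.sliceIndices PySem.List.clampIdx
  norm_num
  by_cases h2 : i < 0
  · by_cases h3 : (xs.length : Int) + i < 0
    · have : (max (i + (xs.length : Int)) 0).toNat = 0 := by omega
      simp [h2, h3, this]
    · have : (max (i + (xs.length : Int)) 0).toNat = ((xs.length : Int) + i).toNat := by omega
      simp [h2, h3, this]
  · have : (min i (xs.length : Int)).toNat = min i.toNat xs.length := by omega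
    simp [h2, this]

theorem pop_last_of_ne_nil {α : Type} (xs : List α) (h : xs ≠ []) :
    PySem.List.pop? xs = some (xs.getLast h, xs.dropLast) := by
  conv_lhs => rw [← List.dropLast_append_getLast h]
  rw [PySem.List.pop?_last]

theorem rotate_pred (s : List Int) (h : s ≠ []) :
    s.rotate (s.length - 1) = s.getLast h :: s.dropLast := by
  rw [List.rotate_eq_drop_append_take (by omega), List.drop_length_sub_one h,
    ← List.dropLast_eq_take]
  rfl

-- A's positive loop rotates the suffix segment right, i.e. left by (len-1), n times.
theorem rollStack_pos (n : Nat) (a s : List Int) (i : Int) (hs : s ≠ [])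
    (hc : PySem.List.clampIdx (a.length + s.length - 1) i = a.length) :
    rollStack (a ++ s) (n : Int) i = a ++ s.rotate ((s.length - 1) * n) := by
  induction n generalizing s with
  | zero => rw [rollStack]; norm_num
  | succ m ih =>
    rw [rollStack]
    have hpos : ((m : Int) + 1) > 0 := by omega
    simp only [Nat.cast_add, Nat.cast_one, if_pos hpos]
    rw [pop_last_of_ne_nil (a ++ s) (by simp [hs])]
    have hgl : (a ++ s).getLast (by simp [hs]) = s.getLast hs := List.getLast_append_right hs
    have hdl : (a ++ s).dropLast = a ++ s.dropLast := List.dropLast_append_of_ne_nil hs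
    simp only [hgl, hdl]
    rw [insert_clamp]
    have hls : 1 ≤ s.length := List.length_pos_of_ne_nil hs
    have hlen : (a ++ s.dropLast).length = a.length + s.length - 1 := by
      rw [List.length_append, List.length_dropLast]; omega
    rw [hlen, hc, List.take_left' rfl, List.drop_left' rfl]
    have hrw : a ++ s.getLast hs :: s.dropLast = a ++ s.rotate (s.length - 1) := by
      rw [rotate_pred s hs]
    rw [hrw]
    have hs' : s.rotate (s.length - 1) ≠ [] := by
      simpa [List.rotate_eq_nil_iff] using hs
    have := ih (s.rotate (s.length - 1)) hs' (by simpa using hc)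
    rw [show ((m : Int) + 1 - 1) = (m : Int) by ring, this, List.rotate_rotate,
      List.length_rotate]
    congr 2
    ring

-- A's negative loop rotates the suffix segment left, n times.
theorem rollStack_neg (n : Nat) (a s : List Int) (i : Int) (hs : s ≠ [])
    (he : PySem.List.pyIdx? (a.length + s.length) i = some a.length) :
    rollStack (a ++ s) (-(n : Int)) i = a ++ s.rotate n := by
  induction n generalizing s with
  | zero => rw [rollStack]; norm_num
  | succ m ih =>
    cases s with
    | nil => exact absurd rfl hs
    | cons hd tl =>
      rw [rollStack]
      have h1 : ¬ (-(((m : Nat) + 1 : Nat) : Int) > 0) := by push_cast; omega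
      have h2 : -(((m : Nat) + 1 : Nat) : Int) < 0 := by push_cast; omega
      rw [if_neg h1, if_pos h2]
      have hp : PySem.List.pop? (a ++ hd :: tl) i = some (hd, a ++ tl) := by
        unfold PySem.List.pop?
        have : (a ++ hd :: tl).length = a.length + (hd :: tl).length := by simp
        rw [this, he]
        simp only [Option.bind_some]
        rw [List.getElem?_append_right (le_refl _), List.eraseIdx_append_of_length_le (le_refl _)]
        simp
      rw [hp]
      dsimp only
      have hstep : a ++ tl ++ [hd] = a ++ (hd :: tl).rotate 1 := by
        rw [List.rotate_cons_succ, List.rotate_zero, List.append_assoc]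
      rw [hstep]
      have hs' : (hd :: tl).rotate 1 ≠ [] := by simp
      have he' : PySem.List.pyIdx? (a.length + ((hd :: tl).rotate 1).length) i = some a.length := by
        simpa [List.length_rotate] using he
      have := ih ((hd :: tl).rotate 1) hs' he'
      rw [show (-(((m : Nat) + 1 : Nat) : Int) + 1) = -((m : Nat) : Int) by push_cast; ring,
        this, List.rotate_rotate]
      rw [Nat.add_comm 1 m]

theorem mul_pred_mod (m t : Nat) (hm : 0 < m) : ((m - 1) * t) % m = (m - t % m) % m := by
  have hr : t % m < m := Nat.mod_lt _ hm
  have h1 : ((m - 1) * t) % m = ((m - 1) * (t % m)) % m := by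
    conv_lhs => rw [Nat.mul_mod]
    conv_rhs => rw [Nat.mul_mod, Nat.mod_mod]
  rw [h1]
  rcases Nat.eq_zero_or_pos (t % m) with h0 | hpos
  · simp [h0]
  · have hid : (m - 1) * (t % m) = (m - t % m) + m * (t % m - 1) := by
      zify [hpos, hr.le, hm, Nat.one_le_iff_ne_zero.mpr (by omega : m ≠ 0)]
      ring
    rw [hid, Nat.add_mul_mod_self_left]

-- ===== VERDICT (by name: the statement is the Claim_ definition above) =====
theorem rollStack_spec : Claim_equal_rollStack := by
  intro dataStack n i _hDom hPre
  unfold Spec_rollStack rollStack_alt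
  simp only []
  set L : Int := (dataStack.length : Int) with hL
  rcases hPre with h0 | ⟨hpos, hne⟩ | ⟨hneg, hlo, hhi⟩
  · subst h0
    rw [rollStack]
    norm_num
  · -- positive rolls, nonempty stack
    have hL1 : 1 ≤ dataStack.length := List.length_pos_of_ne_nil hne
    have hcond : ¬ (n = 0 ∨ L = 0) := by simp only [hL]; omega
    rw [if_neg hcond, if_pos hpos]
    set p' : Nat := PySem.List.clampIdx (dataStack.length - 1) i with hp'
    have hp'le : p' ≤ dataStack.length - 1 := by
      rw [hp']; unfold PySem.List.clampIdx; split_ifs <;> omega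
    have hpEq : max 0 (min (if i ≥ 0 then i else i + L - 1) (L - 1)) = (p' : Int) := by
      rw [hp']; unfold PySem.List.clampIdx
      simp only [hL]
      split_ifs <;> omega
    rw [hpEq]
    set a := dataStack.take p' with ha
    set s := dataStack.drop p' with hsdef
    have hsl : s.length = dataStack.length - p' := by simp [hsdef]
    have hal : a.length = p' := by simp [ha]; omega
    have hsne : s ≠ [] := by
      intro hnil; rw [hnil] at hsl; simp at hsl; omega
    have hAs : a ++ s = dataStack := List.take_append_drop p' dataStack
    set seg : Nat := dataStack.length - p' with hseg
    have hseg1 : 1 ≤ seg := by omega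
    have hsegI : L - (p' : Int) = (seg : Int) := by rw [hL, hseg]; omega
    rw [hsegI]
    have hkmod : PySem.Int.mod n (seg : Int) = ((n.toNat % seg : Nat) : Int) := by
      rw [PySem.Int.mod_eq_emod_of_pos (by exact_mod_cast hseg1),
        show n = (n.toNat : Int) by omega]
      push_cast
      simp
    rw [hkmod]
    set k' : Nat := n.toNat % seg with hk'
    have hk'lt : k' < seg := Nat.mod_lt _ hseg1
    -- A's side via the rotation lemma
    have hc : PySem.List.clampIdx (a.length + s.length - 1) i = a.length := by
      rw [hal, hsl, show p' + seg - 1 = dataStack.length - 1 by omega, ← hp']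
    have hA : rollStack dataStack n i = a ++ s.rotate ((s.length - 1) * n.toNat) := by
      conv_lhs => rw [← hAs, show n = ((n.toNat : Nat) : Int) by omega]
      exact rollStack_pos n.toNat a s i hsne hc
    rw [hA]
    -- B's slices
    have hLk : L - (k' : Int) = ((dataStack.length - k' : Nat) : Int) := by rw [hL]; omega
    rw [hLk, PySem.List.slice_to_natCast, PySem.List.slice_from_natCast,
      PySem.List.slice_natCast]
    rw [← ha, ← hsdef]
    have hdrop : dataStack.drop (dataStack.length - k') = s.drop (seg - k') := by
      rw [hsdef, List.drop_drop]
      congr 1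
      omega
    have htake : (s.take (dataStack.length - k' - p')) = s.take (seg - k') := by
      congr 1
      omega
    rw [hdrop, htake, List.append_assoc]
    congr 1
    -- rotation arithmetic on the segment
    rw [← List.rotate_mod, hsl, mul_pred_mod seg n.toNat hseg1, ← hk']
    rcases Nat.eq_zero_or_pos k' with h0 | hk'pos
    · rw [h0, Nat.sub_zero, Nat.mod_self, List.rotate_zero, ← hsl]
      simp
    · rw [Nat.mod_eq_of_lt (by omega)]
      exact List.rotate_eq_drop_append_take (by omega)
  · -- negative rolls, valid pop index
    have hL1 : 1 ≤ dataStack.length := by omega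
    have hcond : ¬ (n = 0 ∨ L = 0) := by simp only [hL]; omega
    rw [if_neg hcond, if_neg (show ¬ n > 0 by omega)]
    set e' : Nat := (if 0 ≤ i then i.toNat else dataStack.length - (-i).toNat) with he'
    have he'lt : e' < dataStack.length := by rw [he']; split_ifs <;> omega
    have hidx : PySem.List.pyIdx? dataStack.length i = some e' := by
      unfold PySem.List.pyIdx?
      rw [he']
      split_ifs with h1 <;> simp
    have heEq : (if i ≥ 0 then i else i + L) = (e' : Int) := by
      rw [he', hL]; split_ifs <;> omega
    rw [heEq]
    set a := dataStack.take e' with ha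
    set s := dataStack.drop e' with hsdef
    have hsl : s.length = dataStack.length - e' := by simp [hsdef]
    have hal : a.length = e' := by simp [ha]; omega
    have hsne : s ≠ [] := by
      intro hnil; rw [hnil] at hsl; simp at hsl; omega
    have hAs : a ++ s = dataStack := List.take_append_drop e' dataStack
    set seg : Nat := dataStack.length - e' with hseg
    have hseg1 : 1 ≤ seg := by omega
    have hsegI : L - (e' : Int) = (seg : Int) := by rw [hL, hseg]; omega
    rw [hsegI]
    have hkmod : PySem.Int.mod (-n) (seg : Int) = ((n.natAbs % seg : Nat) : Int) := by
      rw [PySem.Int.mod_eq_emod_of_pos (by exact_mod_cast hseg1),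
        show -n = (n.natAbs : Int) by omega]
      push_cast
      simp
    rw [hkmod]
    set k' : Nat := n.natAbs % seg with hk'
    have hk'lt : k' < seg := Nat.mod_lt _ hseg1
    have hA : rollStack dataStack n i = a ++ s.rotate n.natAbs := by
      conv_lhs => rw [← hAs, show n = -((n.natAbs : Nat) : Int) by omega]
      refine rollStack_neg n.natAbs a s i hsne ?_
      rw [hal, hsl, show e' + seg = dataStack.length by omega, hidx]
    rw [hA]
    have hek : (e' : Int) + (k' : Int) = ((e' + k' : Nat) : Int) := by push_cast; ring
    rw [hek, PySem.List.slice_to_natCast, PySem.List.slice_from_natCast,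
      PySem.List.slice_natCast]
    rw [← ha, ← hsdef]
    have hdrop : dataStack.drop (e' + k') = s.drop k' := by
      rw [hsdef, List.drop_drop]
    have htake : s.take (e' + k' - e') = s.take k' := by congr 1; omega
    rw [hdrop, htake, List.append_assoc]
    congr 1
    rw [← List.rotate_mod, hsl, ← hk']
    exact List.rotate_eq_drop_append_take (by omega)
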